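-- pv_equiv track=rewrite | github.com/Hack4Impact-UMD/food-for-all-dc | ETL/update_single_client.py | parse_frequency
-- ===== SOURCE A (Python) =====
-- def parse_frequency(frequency_str):
--     if not frequency_str or not str(frequency_str).strip():
--         return "None"
--     freq = str(frequency_str).strip().lower()
--     emergency_keywords = ["emergency", "only", "two time only", "one time only", "emerg"]
--     if any(keyword in freq for keyword in emergency_keywords):
--         return "Emergency"
--     if "periodic" in freq or "perodic" in freq:
--         return "Periodic"
--     if freq in ["none", "n/a", "na", ""]:
--         return "None"
--     elif "weekly" in freq or "week" in freq or freq in ["1x/week", "once/week", "every week"]: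
--         return "Weekly"
--     elif any(pattern in freq for pattern in ["2x", "twice", "two", "bi-monthly", "bimonthly", "2/month", "2x/month", "twice/month"]):
--         return "2x-Monthly"
--     elif any(pattern in freq for pattern in ["monthly", "month", "1x/month", "once/month", "every month", "one/month"]):
--         return "Monthly"
--     else:
--         return "Periodic"
-- ===== SOURCE B (Python) =====
-- # Minimized keyword table + single ascending-priority pass with last-match-wins
-- # overwrite accumulator (output built back-to-front), instead of A's descending
-- # first-match if/elif cascade over redundant keyword lists.
-- PAIRS = (("month", "Monthly"), ("2x", "2x-Monthly"), ("twice", "2x-Monthly"),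
--          ("two", "2x-Monthly"), ("bi-monthly", "2x-Monthly"), ("bimonthly", "2x-Monthly"),
--          ("2/month", "2x-Monthly"), ("week", "Weekly"),
--          ("periodic", "Periodic"), ("perodic", "Periodic"),
--          ("emerg", "Emergency"), ("only", "Emergency"))
--
--
-- def parse_frequency(frequency_str):
--     freq = str(frequency_str).strip().lower()
--     if not freq:
--         return "None"
--     if freq in ("none", "n/a", "na"):
--         return "None"
--     label = "Periodic"
--     for kw, cat in PAIRS:
--         if kw in freq:
--             label = cat
--     return label
-- ===== Notes on version B (the rewrite author's own statement) =====
-- stated objective: alternative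
-- what changed: B minimizes A's keyword lists using substring redundancy (e.g. 'weekly' and all Weekly exact forms contain 'week', 'emergency' contains 'emerg'), hoists the exact None-string check (those strings contain no keyword), and replaces the descending first-match if/elif cascade by one ascending-priority pass over a flat (keyword,label) table with a last-match-wins overwrite accumulator.
import Mathlib
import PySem

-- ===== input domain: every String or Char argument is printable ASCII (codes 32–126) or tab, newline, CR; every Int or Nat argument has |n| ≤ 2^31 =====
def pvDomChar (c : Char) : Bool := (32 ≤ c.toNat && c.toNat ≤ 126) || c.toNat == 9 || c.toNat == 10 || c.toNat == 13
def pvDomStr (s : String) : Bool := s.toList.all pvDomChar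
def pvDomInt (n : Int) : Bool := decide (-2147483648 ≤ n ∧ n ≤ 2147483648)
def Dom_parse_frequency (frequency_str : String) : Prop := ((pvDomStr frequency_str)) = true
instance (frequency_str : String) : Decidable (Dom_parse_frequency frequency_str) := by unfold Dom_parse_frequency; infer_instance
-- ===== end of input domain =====

-- B replaces A's descending first-match if/elif cascade over redundant keyword lists by a
-- minimized flat (keyword,label) table scanned once in ascending priority with a
-- last-match-wins overwrite accumulator (alternative decomposition; same cost).

-- ===== PORT A =====
def parse_frequency (frequency_str : String) : String :=
  if frequency_str == "" || PySem.Str.strip frequency_str == "" then "None"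
  else
    let freq := PySem.Str.lower (PySem.Str.strip frequency_str)
    let emergency_keywords := ["emergency", "only", "two time only", "one time only", "emerg"]
    if emergency_keywords.any (fun k => PySem.Str.isIn k freq) then "Emergency"
    else if PySem.Str.isIn "periodic" freq || PySem.Str.isIn "perodic" freq then "Periodic"
    else if ["none", "n/a", "na", ""].contains freq then "None"
    else if PySem.Str.isIn "weekly" freq || PySem.Str.isIn "week" freq
            || ["1x/week", "once/week", "every week"].contains freq then "Weekly"
    else if ["2x", "twice", "two", "bi-monthly", "bimonthly", "2/month", "2x/month", "twice/month"].any
              (fun p => PySem.Str.isIn p freq) then "2x-Monthly"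
    else if ["monthly", "month", "1x/month", "once/month", "every month", "one/month"].any
              (fun p => PySem.Str.isIn p freq) then "Monthly"
    else "Periodic"

-- ===== PORT B =====
def pvPairs : List (String × String) :=
  [ ("month", "Monthly"), ("2x", "2x-Monthly"), ("twice", "2x-Monthly"),
    ("two", "2x-Monthly"), ("bi-monthly", "2x-Monthly"), ("bimonthly", "2x-Monthly"),
    ("2/month", "2x-Monthly"), ("week", "Weekly"),
    ("periodic", "Periodic"), ("perodic", "Periodic"),
    ("emerg", "Emergency"), ("only", "Emergency") ]

def parse_frequency_alt (frequency_str : String) : String :=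
  let freq := PySem.Str.lower (PySem.Str.strip frequency_str)
  if freq == "" then "None"
  else if ["none", "n/a", "na"].contains freq then "None"
  else pvPairs.foldl (fun label p => if PySem.Str.isIn p.1 freq then p.2 else label) "Periodic"

-- ===== PRECONDITION & SPEC =====
def Spec_parse_frequency (frequency_str : String) (out : String) : Prop := out = parse_frequency_alt frequency_str
instance (frequency_str : String) (out : String) : Decidable (Spec_parse_frequency frequency_str out) := by unfold Spec_parse_frequency; infer_instance

-- ===== CLAIM (what is proved, stated in full; the proofs are below) =====
def Claim_equal_parse_frequency : Prop := ∀ (frequency_str : String), Dom_parse_frequency frequency_str → Spec_parse_frequency frequency_str (parse_frequency frequency_str)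

-- ===== LEMMAS AND PROOFS =====
theorem lower_empty_iff (t : String) : (PySem.Str.lower t = "") ↔ t = "" := by
  constructor
  · intro h
    have h' := congrArg String.toList h
    simp [PySem.Chars.lower] at h'
    exact String.toList_inj.mp (by simp [h'])
  · intro h; subst h; rfl

theorem isIn_mono (a b s : String) (h : a.toList <:+: b.toList)
    (hb : PySem.Str.isIn b s = true) : PySem.Str.isIn a s = true := by
  rw [PySem.Str.isIn_iff_infix] at hb ⊢
  exact h.trans hb

theorem isIn_mono' (a b s : String) (h : a.toList <:+: b.toList)
    (ha : PySem.Str.isIn a s = false) : PySem.Str.isIn b s = false := by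
  cases hb : PySem.Str.isIn b s
  · rfl
  · rw [isIn_mono a b s h hb] at ha; exact ha

-- A's compound conditions reduced to the minimal keyword atoms
theorem hE (freq : String) :
    (["emergency", "only", "two time only", "one time only", "emerg"].any
      (fun k => PySem.Str.isIn k freq))
    = (PySem.Str.isIn "emerg" freq || PySem.Str.isIn "only" freq) := by
  simp only [List.any_cons, List.any_nil, Bool.or_false]
  cases he : PySem.Str.isIn "emerg" freq
  · cases ho : PySem.Str.isIn "only" freq
    · rw [isIn_mono' "emerg" "emergency" freq (by decide) he,
        isIn_mono' "only" "two time only" freq (by decide) ho,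
        isIn_mono' "only" "one time only" freq (by decide) ho]
      simp
    · simp
  · simp

theorem hW (freq : String) :
    (PySem.Str.isIn "weekly" freq || PySem.Str.isIn "week" freq
      || ["1x/week", "once/week", "every week"].contains freq)
    = PySem.Str.isIn "week" freq := by
  cases hw : PySem.Str.isIn "week" freq
  · rw [isIn_mono' "week" "weekly" freq (by decide) hw]
    have hc : (["1x/week", "once/week", "every week"].contains freq) = false := by
      cases hc : (["1x/week", "once/week", "every week"].contains freq)
      · rfl
      · simp only [List.contains_cons, List.contains_nil, Bool.or_false, Bool.or_eq_true,
          beq_iff_eq] at hc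
        rcases hc with h | h | h <;> (subst h; exact absurd hw (by decide))
    rw [hc]; simp
  · simp

theorem h2 (freq : String) :
    (["2x", "twice", "two", "bi-monthly", "bimonthly", "2/month", "2x/month", "twice/month"].any
      (fun p => PySem.Str.isIn p freq))
    = (PySem.Str.isIn "2x" freq || PySem.Str.isIn "twice" freq || PySem.Str.isIn "two" freq
       || PySem.Str.isIn "bi-monthly" freq || PySem.Str.isIn "bimonthly" freq
       || PySem.Str.isIn "2/month" freq) := by
  simp only [List.any_cons, List.any_nil, Bool.or_false]
  cases ha : PySem.Str.isIn "2x" freq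
  · cases hb : PySem.Str.isIn "twice" freq
    · rw [isIn_mono' "2x" "2x/month" freq (by decide) ha,
        isIn_mono' "twice" "twice/month" freq (by decide) hb]
      simp [Bool.or_assoc]
    · simp
  · simp

theorem hM (freq : String) :
    (["monthly", "month", "1x/month", "once/month", "every month", "one/month"].any
      (fun p => PySem.Str.isIn p freq))
    = PySem.Str.isIn "month" freq := by
  simp only [List.any_cons, List.any_nil, Bool.or_false]
  cases hm : PySem.Str.isIn "month" freq
  · rw [isIn_mono' "month" "monthly" freq (by decide) hm,
      isIn_mono' "month" "1x/month" freq (by decide) hm,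
      isIn_mono' "month" "once/month" freq (by decide) hm,
      isIn_mono' "month" "every month" freq (by decide) hm,
      isIn_mono' "month" "one/month" freq (by decide) hm]
    simp
  · simp

-- the two decision trees over the 12 minimal boolean atoms coincide
theorem core_bool (em onl per perd wk x2 tw two bm1 bm2 tpm mo : Bool) :
    (if em || onl then "Emergency"
     else if per || perd then "Periodic"
     else if wk then "Weekly"
     else if x2 || tw || two || bm1 || bm2 || tpm then "2x-Monthly"
     else if mo then "Monthly"
     else "Periodic")
    = (if onl then "Emergency" else if em then "Emergency"
       else if perd then "Periodic" else if per then "Periodic"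
       else if wk then "Weekly"
       else if tpm then "2x-Monthly" else if bm2 then "2x-Monthly"
       else if bm1 then "2x-Monthly" else if two then "2x-Monthly"
       else if tw then "2x-Monthly" else if x2 then "2x-Monthly"
       else if mo then "Monthly" else "Periodic") := by
  cases em <;> cases onl <;> cases per <;> cases perd <;> cases wk <;> cases x2 <;>
    cases tw <;> cases two <;> cases bm1 <;> cases bm2 <;> cases tpm <;> cases mo <;> rfl

-- the tails of A and B after the empty-guard agree for nonempty freq
theorem cores_eq (freq : String) (hne : freq ≠ "") :
    (if (["emergency", "only", "two time only", "one time only", "emerg"].any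
          (fun k => PySem.Str.isIn k freq)) then "Emergency"
     else if PySem.Str.isIn "periodic" freq || PySem.Str.isIn "perodic" freq then "Periodic"
     else if ["none", "n/a", "na", ""].contains freq then "None"
     else if PySem.Str.isIn "weekly" freq || PySem.Str.isIn "week" freq
             || ["1x/week", "once/week", "every week"].contains freq then "Weekly"
     else if ["2x", "twice", "two", "bi-monthly", "bimonthly", "2/month", "2x/month", "twice/month"].any
               (fun p => PySem.Str.isIn p freq) then "2x-Monthly"
     else if ["monthly", "month", "1x/month", "once/month", "every month", "one/month"].any
               (fun p => PySem.Str.isIn p freq) then "Monthly"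
     else "Periodic")
    = (if ["none", "n/a", "na"].contains freq then "None"
       else pvPairs.foldl (fun label p => if PySem.Str.isIn p.1 freq then p.2 else label)
              "Periodic") := by
  by_cases hc : ["none", "n/a", "na"].contains freq = true
  · simp only [List.contains_cons, List.contains_nil, Bool.or_false, Bool.or_eq_true,
      beq_iff_eq] at hc
    rcases hc with h | h | h <;> (subst h; decide)
  · rw [Bool.not_eq_true] at hc
    have hc4 : (["none", "n/a", "na", ""].contains freq) = false := by
      simp only [List.contains_cons, List.contains_nil, Bool.or_false,
        Bool.or_eq_false_iff] at hc ⊢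
      exact ⟨hc.1, hc.2.1, hc.2.2, beq_eq_false_iff_ne.mpr hne⟩
    rw [hc, hc4, hE, hW, h2, hM]
    simp only [Bool.false_eq_true, if_false, pvPairs, List.foldl]
    exact core_bool _ _ _ _ _ _ _ _ _ _ _ _

-- ===== VERDICT (by name: the statement is the Claim_ definition above) =====
theorem parse_frequency_spec : Claim_equal_parse_frequency := by
  intro s _
  unfold Spec_parse_frequency parse_frequency parse_frequency_alt
  by_cases h : s = ""
  · subst h; rfl
  · have h1 : (s == "") = false := beq_eq_false_iff_ne.mpr h
    have h2 : (PySem.Str.lower (PySem.Str.strip s) == "") = (PySem.Str.strip s == "") := by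
      by_cases ht : PySem.Str.strip s = "" <;> simp [ht, lower_empty_iff]
    simp only [h1, h2, Bool.false_or]
    by_cases hs : PySem.Str.strip s = ""
    · simp [hs]
    · have hne : PySem.Str.lower (PySem.Str.strip s) ≠ "" := fun hx =>
        hs ((lower_empty_iff _).mp hx)
      simp only [beq_eq_false_iff_ne.mpr hs, Bool.false_eq_true, if_false]
      exact cores_eq (PySem.Str.lower (PySem.Str.strip s)) hne
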